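-- pv_equiv track=rewrite | github.com/raeez/chiral-bar-cobar | compute/lib/string_field_theory_engine.py | bosonic_string_partition_coeffs
-- ===== SOURCE A (Python) =====
-- from typing import Any, Dict, List, Optional, Tuple
--
-- def bosonic_string_partition_coeffs(d: int = 24, max_N: int = 15
--                                      ) -> List[int]:
--     """Compute p_d(N) = number of states at mass level N.
--
--     The partition function for d transverse oscillators:
--       prod_{n>=1} 1/(1-q^n)^d = sum_{N>=0} p_d(N) q^N
--
--     For the open bosonic string in light-cone gauge: d = D-2 = 24.
--     For the closed string: each side has d oscillators, with level matching.
--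
--     Multi-path verification:
--       Path 1: Direct coefficient extraction from generating function
--       Path 2: Virasoro character formula
--       Path 3: Recursive formula from oscillator algebra
--     """
--     from math import comb
--
--     coeffs = [0] * (max_N + 1)
--     coeffs[0] = 1
--
--     if d == 0:
--         # Zero oscillators: only the vacuum state at level 0
--         return coeffs
--
--     for n in range(1, max_N + 1):
--         # Multiply generating function by 1/(1-q^n)^d
--         # 1/(1-x)^d = sum_{k>=0} C(k+d-1, d-1) x^k
--         for N in range(max_N, n - 1, -1):
--             for k in range(1, N // n + 1):
--                 if N - n * k >= 0:
--                     binom = comb(k + d - 1, d - 1)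
--                     coeffs[N] += binom * coeffs[N - n * k]
--
--     return coeffs
-- ===== SOURCE B (Python) =====
-- def bosonic_string_partition_coeffs(d: int = 24, max_N: int = 15) -> list:
--     """Divisor-sum (Euler/log-derivative) recurrence:
--     N * p_d(N) = d * sum_{k=1}^{N} sigma(k) * p_d(N-k), sigma via a sieve."""
--     if d == 0:
--         # no oscillators: only the vacuum state
--         return [1] + [0] * max_N
--     sigma = [0] * (max_N + 1)
--     for n in range(1, max_N + 1):
--         for m in range(n, max_N + 1, n):
--             sigma[m] += n
--     p = [0] * (max_N + 1)
--     p[0] = 1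
--     for N in range(1, max_N + 1):
--         s = 0
--         for k in range(1, N + 1):
--             s += sigma[k] * p[N - k]
--         p[N] = d * s // N
--     return p
-- ===== Notes on version B (the rewrite author's own statement) =====
-- stated objective: faster
-- what changed: Replaces the per-factor binomial-series multiplication (triple loop with math.comb) by the divisor-sum recurrence N*p(N) = d*sum sigma(k)*p(N-k) with sigma computed by a sieve: O(max_N^2) integer operations, no binomial-coefficient evaluations, cost independent of d.
-- outside the precondition, e.g. on bosonic_string_partition_coeffs(-1, 0): A returns [1], B returns [1]
import Mathlib
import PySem

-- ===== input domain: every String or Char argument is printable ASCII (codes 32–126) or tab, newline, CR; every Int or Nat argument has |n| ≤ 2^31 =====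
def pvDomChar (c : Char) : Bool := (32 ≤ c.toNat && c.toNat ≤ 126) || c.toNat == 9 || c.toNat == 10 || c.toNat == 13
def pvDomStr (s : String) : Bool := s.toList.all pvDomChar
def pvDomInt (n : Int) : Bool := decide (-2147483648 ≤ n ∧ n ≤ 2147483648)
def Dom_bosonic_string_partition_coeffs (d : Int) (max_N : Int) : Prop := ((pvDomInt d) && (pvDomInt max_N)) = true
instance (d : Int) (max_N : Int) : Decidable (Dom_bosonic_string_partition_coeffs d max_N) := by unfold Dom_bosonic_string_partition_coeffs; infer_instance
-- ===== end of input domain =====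

-- B replaces A's per-factor binomial-series multiplication (triple loop with math.comb) by the
-- divisor-sum recurrence N*p(N) = d*Σ σ(k)*p(N-k) with σ computed by a sieve (objective: faster).

-- ===== PORT A =====
def bosonic_string_partition_coeffs (d : Int) (max_N : Int) : List Int :=
  let coeffs := ((List.replicate (max_N + 1).toNat (0 : Int)).set 0 1)
  if d = 0 then coeffs
  else
    (PySem.List.pyRange 1 (max_N + 1) 1).foldl (fun coeffs n =>
      (PySem.List.pyRange max_N (n - 1) (-1)).foldl (fun coeffs N =>
        (PySem.List.pyRange 1 (PySem.Int.floordiv N n + 1) 1).foldl (fun coeffs k =>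
          if N - n * k ≥ 0 then
            let binom : Int := ((k + d - 1).toNat.choose (d - 1).toNat : Int)
            coeffs.set N.toNat (coeffs.getD N.toNat 0 + binom * coeffs.getD (N - n * k).toNat 0)
          else coeffs) coeffs) coeffs) coeffs

-- ===== PORT B =====
def bosonic_string_partition_coeffs_alt (d : Int) (max_N : Int) : List Int :=
  if d = 0 then 1 :: List.replicate max_N.toNat (0 : Int)
  else
  let sigma := (PySem.List.pyRange 1 (max_N + 1) 1).foldl (fun sigma n =>
      (PySem.List.pyRange n (max_N + 1) n).foldl (fun sigma m =>
        sigma.set m.toNat (sigma.getD m.toNat 0 + n)) sigma)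
    (List.replicate (max_N + 1).toNat (0 : Int))
  let p := ((List.replicate (max_N + 1).toNat (0 : Int)).set 0 1)
  (PySem.List.pyRange 1 (max_N + 1) 1).foldl (fun p N =>
    let s := (PySem.List.pyRange 1 (N + 1) 1).foldl (fun s k =>
      s + sigma.getD k.toNat 0 * p.getD (N - k).toNat 0) 0
    p.set N.toNat (PySem.Int.floordiv (d * s) N)) p

-- ===== PRECONDITION & SPEC =====
-- Pre_ excludes max_N < 0 (A raises IndexError on `coeffs[0] = 1` of an empty list) and d < 0,
-- where math.comb raises ValueError on a negative argument except in the degenerate corner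
-- max_N = 0 (no loop iteration reaches comb), on which both programs return the same [1].
def Pre_bosonic_string_partition_coeffs (d : Int) (max_N : Int) : Prop := 0 ≤ d ∧ 0 ≤ max_N
instance (d : Int) (max_N : Int) : Decidable (Pre_bosonic_string_partition_coeffs d max_N) := by
  unfold Pre_bosonic_string_partition_coeffs; infer_instance

def pvWitness_bosonic_string_partition_coeffs : Int × Int := (24, 15)

def Spec_bosonic_string_partition_coeffs (d : Int) (max_N : Int) (out : List Int) : Prop := out = bosonic_string_partition_coeffs_alt d max_N
instance (d : Int) (max_N : Int) (out : List Int) : Decidable (Spec_bosonic_string_partition_coeffs d max_N out) := by unfold Spec_bosonic_string_partition_coeffs; infer_instance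

-- ===== CLAIM (what is proved, stated in full; the proofs are below) =====
def Claim_equal_bosonic_string_partition_coeffs : Prop := ∀ (d : Int) (max_N : Int), Dom_bosonic_string_partition_coeffs d max_N → Pre_bosonic_string_partition_coeffs d max_N → Spec_bosonic_string_partition_coeffs d max_N (bosonic_string_partition_coeffs d max_N)

-- ===== LEMMAS AND PROOFS =====

def pvDelta (N : ℕ) : ℤ := if N = 0 then 1 else 0
def pvG (dd n j : ℕ) : ℤ := if n ∣ j then ((j / n + dd - 1).choose (dd - 1) : ℤ) else 0
def pvStep (dd n : ℕ) (f : ℕ → ℤ) (N : ℕ) : ℤ :=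
  ∑ j ∈ Finset.range (N + 1), pvG dd n j * f (N - j)
def pvFA (dd : ℕ) : ℕ → (ℕ → ℤ)
  | 0 => pvDelta
  | (n + 1) => pvStep dd (n + 1) (pvFA dd n)
def pvSigma (k : ℕ) : ℤ := ∑ n ∈ k.divisors, (n : ℤ)
def pvP (dd : ℕ) : ℕ → ℤ
  | 0 => 1
  | (N + 1) => PySem.Int.floordiv
      ((dd : ℤ) * ∑ k ∈ Finset.range (N + 1), pvSigma (k + 1) * pvP dd (N - k)) ((N : ℤ) + 1)
  decreasing_by exact Nat.lt_succ_of_le (Nat.sub_le _ _)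

def pvPP (f a : ℕ → ℤ) : Prop := ∀ N : ℕ, (N : ℤ) * f N = ∑ k ∈ Finset.Icc 1 N, a k * f (N - k)

-- hockey stick
theorem pvHS (e q : ℕ) :
    ∑ t ∈ Finset.range q, (t + e).choose e = (q + e).choose (e + 1) := by
  induction q with
  | zero => simp
  | succ q ih =>
      rw [Finset.sum_range_succ, ih]
      have : q + 1 + e = (q + e) + 1 := by omega
      rw [this, Nat.choose_succ_succ' (q + e) e]
      omega

-- absorption
theorem pvAB (e q : ℕ) :
    (e + 1) * (q + e).choose (e + 1) = q * (q + e).choose e := by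
  have h := Nat.choose_succ_right_eq (q + e) e
  have : q + e - e = q := by omega
  rw [this] at h
  calc (e + 1) * (q + e).choose (e + 1) = (q + e).choose (e + 1) * (e + 1) := by ring
    _ = (q + e).choose e * q := h
    _ = q * (q + e).choose e := by ring


theorem pvIccRange (f : ℕ → ℤ) (q : ℕ) :
    ∑ i ∈ Finset.Icc 1 q, f i = ∑ i ∈ Finset.range q, f (1 + i) := by
  rw [← Finset.Ico_add_one_right_eq_Icc, Finset.sum_Ico_eq_sum_range]
  simp

theorem pvG_zero (e n : ℕ) : pvG (e+1) n 0 = 1 := by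
  simp [pvG]

theorem pvG_mul (e n q : ℕ) (hn : 1 ≤ n) : pvG (e+1) n (n*q) = ((q + e).choose e : ℤ) := by
  unfold pvG
  rw [if_pos ⟨q, rfl⟩]
  rw [Nat.mul_div_cancel_left q (by omega)]
  norm_num

-- single-factor log-derivative identity
theorem pvM2 (e n : ℕ) (hn : 1 ≤ n) (j : ℕ) :
    (j : ℤ) * pvG (e+1) n j
      = ∑ k ∈ Finset.Icc 1 j, (if n ∣ k then (((e+1)*n : ℕ) : ℤ) else 0) * pvG (e+1) n (j - k) := by
  by_cases h : n ∣ j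
  · obtain ⟨q, rfl⟩ := h
    have himg : ∀ k ∈ Finset.Icc 1 (n*q), k ∉ (Finset.Icc 1 q).image (fun i => n*i) →
        (if n ∣ k then (((e+1)*n : ℕ) : ℤ) else 0) * pvG (e+1) n (n*q - k) = 0 := by
      intro k hk hnk
      rw [Finset.mem_Icc] at hk
      rw [if_neg, zero_mul]
      intro hdvd
      obtain ⟨i, rfl⟩ := hdvd
      exact hnk (Finset.mem_image.mpr ⟨i, Finset.mem_Icc.mpr ⟨by nlinarith [hk.1], by nlinarith [hk.2]⟩, rfl⟩)
    have hsub : (Finset.Icc 1 q).image (fun i => n*i) ⊆ Finset.Icc 1 (n*q) := by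
      intro k hk
      obtain ⟨i, hi, rfl⟩ := Finset.mem_image.mp hk
      rw [Finset.mem_Icc] at hi ⊢
      constructor
      · nlinarith [hi.1]
      · nlinarith [hi.2]
    rw [← Finset.sum_subset hsub himg]
    rw [Finset.sum_image (by intro a _ b _ hab; exact Nat.eq_of_mul_eq_mul_left (by omega) hab)]
    have hterm : ∀ i ∈ Finset.Icc 1 q,
        (if n ∣ n*i then (((e+1)*n : ℕ) : ℤ) else 0) * pvG (e+1) n (n*q - n*i)
          = (((e+1)*n : ℕ) : ℤ) * ((q - i + e).choose e : ℤ) := by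
      intro i hi
      rw [if_pos ⟨i, rfl⟩, ← Nat.mul_sub, pvG_mul e n (q-i) hn]
    rw [Finset.sum_congr rfl hterm]
    rw [← Finset.mul_sum]
    have hre : ∑ i ∈ Finset.Icc 1 q, ((q - i + e).choose e : ℤ)
        = ∑ t ∈ Finset.range q, ((t + e).choose e : ℤ) := by
      rw [pvIccRange]
      rw [← Finset.sum_range_reflect]
      apply Finset.sum_congr rfl
      intro i hi
      rw [Finset.mem_range] at hi
      congr 2
      omega
    rw [hre]
    have hhs : ∑ t ∈ Finset.range q, ((t + e).choose e : ℤ) = ((q + e).choose (e+1) : ℤ) := by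
      rw [← Nat.cast_sum]
      exact_mod_cast congrArg (Nat.cast : ℕ → ℤ) (pvHS e q)
    rw [hhs, pvG_mul e n q hn]
    have hab := pvAB e q
    push_cast
    nlinarith [hab]
  · rw [pvG, if_neg h, mul_zero]
    symm
    apply Finset.sum_eq_zero
    intro k hk
    rw [Finset.mem_Icc] at hk
    by_cases hd : n ∣ k
    · have hnd : ¬ n ∣ (j - k) := by
        intro hdd
        apply h
        have := Nat.dvd_add hdd hd
        rwa [Nat.sub_add_cancel hk.2] at this
      simp [pvG, hnd]
    · simp [hd]


theorem pvExtendIcc (N j : ℕ) (hj : j ≤ N) (g : ℕ → ℤ) :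
    ∑ k ∈ Finset.Icc 1 j, g k = ∑ k ∈ Finset.Icc 1 N, (if k ≤ j then g k else 0) := by
  rw [← Finset.sum_filter]
  apply Finset.sum_congr _ (fun _ _ => rfl)
  ext x; simp [Finset.mem_filter, Finset.mem_Icc]; omega
theorem pvM1 : pvPP pvDelta (fun _ => 0) := by
  intro N
  cases N with
  | zero => simp [pvDelta]
  | succ n => simp [pvDelta]

theorem pvM3 (e n : ℕ) (hn : 1 ≤ n) (f a : ℕ → ℤ) (hf : pvPP f a) :
    pvPP (pvStep (e+1) n f) (fun k => a k + (if n ∣ k then (((e+1)*n : ℕ) : ℤ) else 0)) := by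
  intro N
  have split : (N : ℤ) * pvStep (e+1) n f N
      = (∑ j ∈ Finset.range (N+1), ((j:ℤ) * pvG (e+1) n j) * f (N - j))
        + (∑ j ∈ Finset.range (N+1), pvG (e+1) n j * (((N - j : ℕ):ℤ) * f (N - j))) := by
    rw [pvStep, Finset.mul_sum, ← Finset.sum_add_distrib]
    apply Finset.sum_congr rfl
    intro j hj
    rw [Finset.mem_range] at hj
    have hcast : (N : ℤ) = (j : ℤ) + ((N - j : ℕ) : ℤ) := by
      push_cast [Nat.cast_sub (by omega : j ≤ N)]; ring
    rw [hcast]; ring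
  have S1 : (∑ j ∈ Finset.range (N+1), ((j:ℤ) * pvG (e+1) n j) * f (N - j))
      = ∑ k ∈ Finset.Icc 1 N, (if n ∣ k then (((e+1)*n : ℕ) : ℤ) else 0) * pvStep (e+1) n f (N - k) := by
    have step1 : ∀ j ∈ Finset.range (N+1),
        ((j:ℤ) * pvG (e+1) n j) * f (N - j)
          = ∑ k ∈ Finset.Icc 1 N, (if k ≤ j then (if n ∣ k then (((e+1)*n : ℕ) : ℤ) else 0) * pvG (e+1) n (j - k) * f (N - j) else 0) := by
      intro j hj
      rw [Finset.mem_range] at hj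
      rw [pvM2 e n hn j, Finset.sum_mul]
      rw [pvExtendIcc N j (by omega)]
    rw [Finset.sum_congr rfl step1, Finset.sum_comm]
    apply Finset.sum_congr rfl
    intro k hk
    rw [Finset.mem_Icc] at hk
    have inner : ∑ j ∈ Finset.range (N+1), (if k ≤ j then (if n ∣ k then (((e+1)*n : ℕ) : ℤ) else 0) * pvG (e+1) n (j - k) * f (N - j) else 0)
        = ∑ t ∈ Finset.range (N - k + 1), (if n ∣ k then (((e+1)*n : ℕ) : ℤ) else 0) * pvG (e+1) n t * f ((N - k) - t) := by
      rw [← Finset.sum_filter]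
      have hset : (Finset.range (N+1)).filter (fun j => k ≤ j) = Finset.Ico k (N+1) := by
        ext x; simp [Finset.mem_filter, Finset.mem_range, Finset.mem_Ico]; omega
      rw [hset, Finset.sum_Ico_eq_sum_range]
      have : N + 1 - k = N - k + 1 := by omega
      rw [this]
      apply Finset.sum_congr rfl
      intro t ht
      rw [Finset.mem_range] at ht
      have h1 : k + t - k = t := by omega
      have h2 : N - (k + t) = (N - k) - t := by omega
      rw [h1, h2]
    rw [inner, pvStep, Finset.mul_sum]
    apply Finset.sum_congr rfl
    intro t ht
    ring
  have S2 : (∑ j ∈ Finset.range (N+1), pvG (e+1) n j * (((N - j : ℕ):ℤ) * f (N - j)))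
      = ∑ k ∈ Finset.Icc 1 N, a k * pvStep (e+1) n f (N - k) := by
    have step1 : ∀ j ∈ Finset.range (N+1),
        pvG (e+1) n j * (((N - j : ℕ):ℤ) * f (N - j))
          = ∑ k ∈ Finset.Icc 1 N, (if j ≤ N - k then pvG (e+1) n j * (a k * f ((N - j) - k)) else 0) := by
      intro j hj
      rw [Finset.mem_range] at hj
      rw [hf (N - j), Finset.mul_sum, pvExtendIcc N (N - j) (by omega)]
      apply Finset.sum_congr rfl
      intro k hk
      rw [Finset.mem_Icc] at hk
      by_cases hc : k ≤ N - j
      · rw [if_pos hc, if_pos (by omega)]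
      · rw [if_neg hc, if_neg (by omega)]
    rw [Finset.sum_congr rfl step1, Finset.sum_comm]
    apply Finset.sum_congr rfl
    intro k hk
    rw [Finset.mem_Icc] at hk
    have inner : ∑ j ∈ Finset.range (N+1), (if j ≤ N - k then pvG (e+1) n j * (a k * f ((N - j) - k)) else 0)
        = ∑ j ∈ Finset.range (N - k + 1), pvG (e+1) n j * (a k * f ((N - k) - j)) := by
      rw [← Finset.sum_filter]
      have hset : (Finset.range (N+1)).filter (fun j => j ≤ N - k) = Finset.range (N - k + 1) := by
        ext x; simp [Finset.mem_filter, Finset.mem_range]; omega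
      rw [hset]
      apply Finset.sum_congr rfl
      intro j hjr
      rw [Finset.mem_range] at hjr
      have : (N - j) - k = (N - k) - j := by omega
      rw [this]
    rw [inner, pvStep, Finset.mul_sum]
    apply Finset.sum_congr rfl
    intro t ht
    ring
  rw [split, S1, S2, ← Finset.sum_add_distrib]
  apply Finset.sum_congr rfl
  intro k hk
  ring


theorem pvM4 (e m : ℕ) :
    pvPP (pvFA (e+1) m) (fun k => ∑ i ∈ Finset.Icc 1 m, (if i ∣ k then (((e+1)*i : ℕ) : ℤ) else 0)) := by
  induction m with
  | zero => intro N; simpa using pvM1 N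
  | succ m ih =>
      have h := pvM3 e (m+1) (by omega) _ _ ih
      intro N
      have hN := h N
      show (N : ℤ) * pvStep (e+1) (m+1) (pvFA (e+1) m) N = _
      rw [hN]
      apply Finset.sum_congr rfl
      intro k hk
      show _ = (∑ i ∈ Finset.Icc 1 (m+1), (if i ∣ k then (((e+1)*i : ℕ) : ℤ) else 0)) * pvFA (e+1) (m+1) (N - k)
      rw [Finset.sum_Icc_succ_top (by omega : 1 ≤ m + 1)]
      rfl

theorem pvStep_small (e n : ℕ) (f : ℕ → ℤ) (N : ℕ) (h : N < n) :
    pvStep (e+1) n f N = f N := by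
  rw [pvStep, Finset.sum_eq_single 0]
  · rw [pvG_zero]; simp
  · intro j hj hj0
    rw [Finset.mem_range] at hj
    have : ¬ n ∣ j := by
      intro hd
      have := Nat.le_of_dvd (by omega) hd
      omega
    simp [pvG, this]
  · intro hmem
    exact absurd (Finset.mem_range.mpr (by omega)) hmem

theorem pvFA_zero (e m : ℕ) : pvFA (e+1) m 0 = 1 := by
  induction m with
  | zero => simp [pvFA, pvDelta]
  | succ m ih => rw [pvFA, pvStep_small e (m+1) _ 0 (by omega), ih]

theorem pvM5 (e m k : ℕ) (hk1 : 1 ≤ k) (hkm : k ≤ m) :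
    ∑ i ∈ Finset.Icc 1 m, (if i ∣ k then (((e+1)*i : ℕ) : ℤ) else 0)
      = ((e+1 : ℕ) : ℤ) * pvSigma k := by
  have h1 : ∀ i, (if i ∣ k then (((e+1)*i : ℕ) : ℤ) else 0)
      = ((e+1 : ℕ) : ℤ) * (if i ∣ k then (i : ℤ) else 0) := by
    intro i
    by_cases h : i ∣ k <;> simp [h]
  rw [Finset.sum_congr rfl (fun i _ => h1 i), ← Finset.mul_sum]
  congr 1
  rw [← Finset.sum_filter]
  rw [pvSigma]
  apply Finset.sum_congr _ (fun _ _ => rfl)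
  ext i
  simp only [Finset.mem_filter, Finset.mem_Icc, Nat.mem_divisors]
  constructor
  · rintro ⟨⟨_, _⟩, hd⟩; exact ⟨hd, by omega⟩
  · rintro ⟨hd, _⟩
    have hi1 : 1 ≤ i := by
      rcases Nat.eq_zero_or_pos i with h0 | h; · subst h0; simp at hd; omega
      · omega
    exact ⟨⟨hi1, le_trans (Nat.le_of_dvd (by omega) hd) hkm⟩, hd⟩

theorem pvMain (e m : ℕ) : ∀ N, N ≤ m → pvP (e+1) N = pvFA (e+1) m N := by
  intro N
  induction N using Nat.strong_induction_on with
  | _ N ih =>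
    intro hNm
    cases N with
    | zero => rw [pvP, pvFA_zero]
    | succ N =>
        rw [pvP]
        have hsum : ∑ k ∈ Finset.range (N + 1), pvSigma (k + 1) * pvP (e+1) (N - k)
            = ∑ k ∈ Finset.Icc 1 (N+1), pvSigma k * pvFA (e+1) m ((N+1) - k) := by
          rw [pvIccRange (fun k => pvSigma k * pvFA (e+1) m ((N+1) - k)) (N+1)]
          apply Finset.sum_congr rfl
          intro k hk
          rw [Finset.mem_range] at hk
          have h1 : (N + 1) - (1 + k) = N - k := by omega
          have h2 : pvP (e+1) (N - k) = pvFA (e+1) m (N - k) := ih (N - k) (by omega) (by omega)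
          rw [h2, h1, Nat.add_comm 1 k]
        rw [hsum]
        have hdd : ((e+1 : ℕ) : ℤ) * ∑ k ∈ Finset.Icc 1 (N+1), pvSigma k * pvFA (e+1) m ((N+1) - k)
            = ((N+1 : ℕ) : ℤ) * pvFA (e+1) m (N+1) := by
          rw [Finset.mul_sum]
          have : ∀ k ∈ Finset.Icc 1 (N+1),
              ((e+1 : ℕ) : ℤ) * (pvSigma k * pvFA (e+1) m ((N+1) - k))
                = (∑ i ∈ Finset.Icc 1 m, (if i ∣ k then (((e+1)*i : ℕ) : ℤ) else 0)) * pvFA (e+1) m ((N+1) - k) := by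
            intro k hk
            rw [Finset.mem_Icc] at hk
            rw [pvM5 e m k hk.1 (le_trans hk.2 hNm)]
            ring
          rw [Finset.sum_congr rfl this]
          exact (pvM4 e m (N+1)).symm
        rw [hdd]
        rw [show ((N : ℕ) : ℤ) + 1 = ((N+1 : ℕ) : ℤ) by push_cast; ring]
        have hpos : (0 : ℤ) < ((N+1 : ℕ) : ℤ) := by positivity
        rw [PySem.Int.floordiv_eq_ediv_of_pos hpos]
        exact Int.mul_ediv_cancel_left _ (by omega)


def pvNewA (dd nn : ℕ) (c : List Int) (N : ℕ) : ℤ :=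
  ∑ k ∈ Finset.range (N / nn + 1), (((k + dd - 1).choose (dd - 1) : ℕ) : ℤ) * c.getD (N - nn * k) 0

theorem pvGetD_eq (xs : List Int) (j : ℕ) (h : j < xs.length) : xs.getD j 0 = xs[j] :=
  List.getD_eq_getElem xs 0 h

theorem pvAfold_aux (dd nn Nn K : ℕ) (hd : 1 ≤ dd) (hn : 1 ≤ nn) (c : List Int)
    (hN : Nn < c.length) (hK : K ≤ Nn / nn) :
    ((List.range K).map (fun (t : ℕ) => 1 + (t : ℤ))).foldl
      (fun cs k => if ((Nn : ℤ)) - (nn : ℤ) * k ≥ 0 then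
          cs.set ((Nn : ℤ)).toNat (cs.getD ((Nn : ℤ)).toNat 0 +
            (((k + (dd : ℤ) - 1).toNat.choose ((dd : ℤ) - 1).toNat : ℕ) : ℤ) *
              cs.getD (((Nn : ℤ) - (nn : ℤ) * k)).toNat 0)
        else cs) c
    = c.set Nn (∑ k ∈ Finset.range (K + 1), (((k + dd - 1).choose (dd - 1) : ℕ) : ℤ) * c.getD (Nn - nn * k) 0) := by
  induction K with
  | zero =>
      simp only [List.range_zero, List.map_nil, List.foldl_nil]
      have : ∑ k ∈ Finset.range 1, (((k + dd - 1).choose (dd - 1) : ℕ) : ℤ) * c.getD (Nn - nn * k) 0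
          = c.getD Nn 0 := by
        rw [Finset.sum_range_one]
        have : (0 + dd - 1).choose (dd - 1) = 1 := by
          rw [Nat.zero_add, Nat.choose_self]
        rw [this]
        simp
      rw [this, pvGetD_eq c Nn hN]
      exact (List.set_getElem_self hN).symm
  | succ K ih =>
      have hK' : K ≤ Nn / nn := by omega
      have hmul : nn * (K + 1) ≤ Nn := by
        calc nn * (K + 1) ≤ nn * (Nn / nn) := Nat.mul_le_mul_left nn hK
          _ ≤ Nn := Nat.mul_div_le Nn nn
      rw [List.range_succ, List.map_append, List.foldl_append, ih hK']
      simp only [List.map_cons, List.map_nil, List.foldl_cons, List.foldl_nil]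
      have hguard : ((Nn : ℤ)) - (nn : ℤ) * (1 + (K : ℤ)) ≥ 0 := by nlinarith
      rw [if_pos hguard]
      set S := ∑ k ∈ Finset.range (K + 1), (((k + dd - 1).choose (dd - 1) : ℕ) : ℤ) * c.getD (Nn - nn * k) 0 with hS
      have hNt : ((Nn : ℤ)).toNat = Nn := Int.toNat_natCast Nn
      have hlen : Nn < (c.set Nn S).length := by simpa using hN
      have hget1 : (c.set Nn S).getD Nn 0 = S := by
        rw [pvGetD_eq _ Nn hlen, List.getElem_set_self]
      have hcastm : (nn : ℤ) * (1 + (K : ℤ)) = ((nn * (K + 1) : ℕ) : ℤ) := by push_cast; ring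
      have hidx : (((Nn : ℤ) - (nn : ℤ) * (1 + (K : ℤ)))).toNat = Nn - nn * (K + 1) := by
        rw [hcastm]; omega
      have hne : Nn - nn * (K + 1) ≠ Nn := by
        have : 1 ≤ nn * (K + 1) := Nat.mul_pos (by omega) (by omega)
        omega
      have hget2 : (c.set Nn S).getD (Nn - nn * (K + 1)) 0 = c.getD (Nn - nn * (K + 1)) 0 := by
        have hlt : Nn - nn * (K + 1) < c.length := by omega
        rw [pvGetD_eq _ _ (by simpa using hlt), pvGetD_eq _ _ hlt, List.getElem_set_ne]
        omega
      have hbin : (((1 + (K : ℤ)) + (dd : ℤ) - 1).toNat.choose ((dd : ℤ) - 1).toNat : ℕ)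
          = ((K + 1) + dd - 1).choose (dd - 1) := by
        congr 1 <;> omega
      rw [hNt, hget1, hidx, hget2, List.set_set, hbin]
      congr 1
      rw [Finset.sum_range_succ]


-- A's inner k-loop in port form
theorem pvAfold (dd nn Nn : ℕ) (hd : 1 ≤ dd) (hn : 1 ≤ nn) (c : List Int) (hN : Nn < c.length) :
    (PySem.List.pyRange 1 (PySem.Int.floordiv (Nn : ℤ) (nn : ℤ) + 1) 1).foldl
      (fun cs k => if ((Nn : ℤ)) - (nn : ℤ) * k ≥ 0 then
          cs.set ((Nn : ℤ)).toNat (cs.getD ((Nn : ℤ)).toNat 0 +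
            (((k + (dd : ℤ) - 1).toNat.choose ((dd : ℤ) - 1).toNat : ℕ) : ℤ) *
              cs.getD (((Nn : ℤ) - (nn : ℤ) * k)).toNat 0)
        else cs) c
    = c.set Nn (pvNewA dd nn c Nn) := by
  have h1 : PySem.Int.floordiv (Nn : ℤ) (nn : ℤ) = ((Nn / nn : ℕ) : ℤ) :=
    PySem.Int.floordiv_natCast Nn nn
  rw [h1, PySem.List.pyRange_one]
  have h2 : ∀ q : ℕ, (((q : ℤ)) + 1 - 1).toNat = q := fun q => by omega
  rw [h2 (Nn / nn)]
  have h3 : (fun (k : ℕ) => (1 : ℤ) + (k : ℤ)) = (fun (t : ℕ) => 1 + (t : ℤ)) := rfl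
  exact pvAfold_aux dd nn Nn (Nn / nn) hd hn c hN (le_refl _)

-- A's downward N-loop
theorem pvAdown (dd nn : ℕ) (hd : 1 ≤ dd) (hn : 1 ≤ nn) (M : ℕ) (c : List Int) (hM : M < c.length) :
    ((PySem.List.pyRange (M : ℤ) ((nn : ℤ) - 1) (-1)).foldl
      (fun cs N => (PySem.List.pyRange 1 (PySem.Int.floordiv N (nn : ℤ) + 1) 1).foldl
        (fun cs' k => if N - (nn : ℤ) * k ≥ 0 then
            cs'.set N.toNat (cs'.getD N.toNat 0 +
              (((k + (dd : ℤ) - 1).toNat.choose ((dd : ℤ) - 1).toNat : ℕ) : ℤ) *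
                cs'.getD ((N - (nn : ℤ) * k)).toNat 0)
          else cs') cs) c).length = c.length
    ∧ ∀ i < c.length, ((PySem.List.pyRange (M : ℤ) ((nn : ℤ) - 1) (-1)).foldl
      (fun cs N => (PySem.List.pyRange 1 (PySem.Int.floordiv N (nn : ℤ) + 1) 1).foldl
        (fun cs' k => if N - (nn : ℤ) * k ≥ 0 then
            cs'.set N.toNat (cs'.getD N.toNat 0 +
              (((k + (dd : ℤ) - 1).toNat.choose ((dd : ℤ) - 1).toNat : ℕ) : ℤ) *
                cs'.getD ((N - (nn : ℤ) * k)).toNat 0)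
          else cs') cs) c).getD i 0
      = if nn ≤ i ∧ i ≤ M then pvNewA dd nn c i else c.getD i 0 := by
  induction M generalizing c with
  | zero =>
      rw [PySem.List.pyRange_neg_one_eq_nil (by omega)]
      refine ⟨rfl, fun i hi => ?_⟩
      rw [if_neg (by omega)]
      simp
  | succ M ih =>
      by_cases hcase : nn ≤ M + 1
      · rw [PySem.List.pyRange_neg_one_cons (by omega : ((nn : ℤ) - 1) < ((M + 1 : ℕ) : ℤ))]
        simp only [List.foldl_cons]
        have hstep : (PySem.List.pyRange 1 (PySem.Int.floordiv ((M + 1 : ℕ) : ℤ) (nn : ℤ) + 1) 1).foldl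
            (fun cs' k => if ((M + 1 : ℕ) : ℤ) - (nn : ℤ) * k ≥ 0 then
                cs'.set (((M + 1 : ℕ) : ℤ)).toNat (cs'.getD (((M + 1 : ℕ) : ℤ)).toNat 0 +
                  (((k + (dd : ℤ) - 1).toNat.choose ((dd : ℤ) - 1).toNat : ℕ) : ℤ) *
                    cs'.getD ((((M + 1 : ℕ) : ℤ) - (nn : ℤ) * k)).toNat 0)
              else cs') c
            = c.set (M + 1) (pvNewA dd nn c (M + 1)) := by
          have := pvAfold dd nn (M + 1) hd hn c hM
          simpa using this
        have hM1 : ((M + 1 : ℕ) : ℤ) - 1 = (M : ℕ) := by push_cast; ring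
        rw [hM1, hstep]
        set c' := c.set (M + 1) (pvNewA dd nn c (M + 1)) with hc'
        have hlen' : c'.length = c.length := by simp [hc']
        have hM' : M < c'.length := by omega
        obtain ⟨ihlen, ihget⟩ := ih c' hM'
        constructor
        · rw [ihlen, hlen']
        · intro i hi
          have hi' : i < c'.length := by omega
          rw [ihget i hi']
          by_cases h1 : nn ≤ i ∧ i ≤ M
          · rw [if_pos h1, if_pos (by omega)]
            -- pvNewA dd nn c' i = pvNewA dd nn c i : reads at indices ≤ i < M+1
            unfold pvNewA
            apply Finset.sum_congr rfl
            intro k hk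
            congr 1
            have hle : i - nn * k ≤ i := Nat.sub_le _ _
            have hlt : i - nn * k < c.length := by omega
            rw [hc', List.getD_eq_getElem?_getD, List.getD_eq_getElem?_getD,
                List.getElem?_set_ne (by omega)]
          · rw [if_neg h1]
            by_cases h2 : nn ≤ i ∧ i ≤ M + 1
            · have hieq : i = M + 1 := by omega
              rw [if_pos h2, hieq, hc']
              rw [pvGetD_eq _ _ (by simpa using hM), List.getElem_set_self]
            · rw [if_neg h2, hc', List.getD_eq_getElem?_getD, List.getD_eq_getElem?_getD,
                  List.getElem?_set_ne (by omega)]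
      · rw [PySem.List.pyRange_neg_one_eq_nil (by omega)]
        refine ⟨rfl, fun i hi => ?_⟩
        rw [if_neg (by omega)]
        simp


theorem pvStep_eq_newA (e nn : ℕ) (hn : 1 ≤ nn) (f : ℕ → ℤ) (c : List Int) (N : ℕ)
    (hc : ∀ j, j ≤ N → c.getD j 0 = f j) :
    pvNewA (e+1) nn c N = pvStep (e+1) nn f N := by
  unfold pvNewA pvStep
  have himg : ∀ j ∈ Finset.range (N+1), j ∉ (Finset.range (N/nn + 1)).image (fun k => nn*k) →
      pvG (e+1) nn j * f (N - j) = 0 := by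
    intro j hj hnj
    rw [Finset.mem_range] at hj
    have : ¬ nn ∣ j := by
      intro hd
      obtain ⟨k, rfl⟩ := hd
      exact hnj (Finset.mem_image.mpr ⟨k, Finset.mem_range.mpr (by
        have : k ≤ N / nn := Nat.le_div_iff_mul_le (by omega) |>.mpr (by nlinarith)
        omega), rfl⟩)
    simp [pvG, this]
  have hsub : (Finset.range (N/nn + 1)).image (fun k => nn*k) ⊆ Finset.range (N+1) := by
    intro j hj
    obtain ⟨k, hk, rfl⟩ := Finset.mem_image.mp hj
    rw [Finset.mem_range] at hk ⊢
    have : nn * k ≤ nn * (N / nn) := Nat.mul_le_mul_left nn (by omega)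
    have := Nat.mul_div_le N nn
    omega
  rw [← Finset.sum_subset hsub himg]
  rw [Finset.sum_image (by intro a _ b _ hab; exact Nat.eq_of_mul_eq_mul_left (by omega) hab)]
  apply Finset.sum_congr rfl
  intro k hk
  rw [Finset.mem_range] at hk
  have hkle : nn * k ≤ N := by
    have : nn * k ≤ nn * (N / nn) := Nat.mul_le_mul_left nn (by omega)
    have := Nat.mul_div_le N nn
    omega
  rw [pvG_mul e nn k hn, hc (N - nn * k) (by omega)]
  rw [show k + (e+1) - 1 = k + e from by omega, show (e+1) - 1 = e from by omega]

theorem pvInit (m : ℕ) :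
    (List.replicate (m+1) (0:ℤ)).set 0 1 = (List.range (m+1)).map pvDelta := by
  apply List.ext_getElem
  · simp
  · intro i h1 h2
    simp only [List.getElem_map, List.getElem_range]
    rcases Nat.eq_zero_or_pos i with h0 | hp
    · subst h0; simp [pvDelta]
    · rw [List.getElem_set_ne (by omega), List.getElem_replicate]
      simp only [List.length_set, List.length_replicate] at h1
      rw [pvDelta, if_neg (by omega)]

theorem pvMapGetD (g : ℕ → ℤ) (L i : ℕ) (h : i < L) :
    ((List.range L).map g).getD i 0 = g i := by
  rw [List.getD_eq_getElem?_getD, List.getElem?_map, List.getElem?_range h]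
  rfl

theorem pvAouter (e m t : ℕ) (ht : t ≤ m) :
    (PySem.List.pyRange 1 ((t : ℤ) + 1) 1).foldl
      (fun cs n =>
        (PySem.List.pyRange (m : ℤ) (n - 1) (-1)).foldl
          (fun cs' N => (PySem.List.pyRange 1 (PySem.Int.floordiv N n + 1) 1).foldl
            (fun cs'' k => if N - n * k ≥ 0 then
                cs''.set N.toNat (cs''.getD N.toNat 0 +
                  (((k + ((e+1 : ℕ) : ℤ) - 1).toNat.choose (((e+1 : ℕ) : ℤ) - 1).toNat : ℕ) : ℤ) *
                    cs''.getD ((N - n * k)).toNat 0)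
              else cs'') cs') cs)
      ((List.replicate (m+1) (0:ℤ)).set 0 1)
    = (List.range (m+1)).map (pvFA (e+1) t) := by
  induction t with
  | zero =>
      rw [PySem.List.pyRange_one_eq_nil (by omega), List.foldl_nil]
      exact pvInit m
  | succ t ih =>
      have ht' : t ≤ m := by omega
      have hsplit : PySem.List.pyRange 1 (((t+1 : ℕ) : ℤ) + 1) 1
          = PySem.List.pyRange 1 ((t : ℤ) + 1) 1 ++ [(t : ℤ) + 1] := by
        have : ((t+1 : ℕ) : ℤ) + 1 = ((t : ℤ) + 1) + 1 := by push_cast; ring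
        rw [this, PySem.List.pyRange_one_succ_right (by omega)]
      rw [hsplit, List.foldl_append, ih ht', List.foldl_cons, List.foldl_nil]
      set s := (List.range (m+1)).map (pvFA (e+1) t) with hs
      have hslen : s.length = m + 1 := by simp [hs]
      have hmlt : m < s.length := by omega
      have hcast : ((t : ℤ) + 1) - 1 = (((t+1 : ℕ) : ℤ)) - 1 := by push_cast; ring
      have hcast2 : ((t : ℤ) + 1) = ((t+1 : ℕ) : ℤ) := by push_cast; ring
      rw [hcast2]
      obtain ⟨hlen, hget⟩ := pvAdown (e+1) (t+1) (by omega) (by omega) m s hmlt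
      apply List.ext_getElem
      · rw [hlen, hslen]; simp
      · intro i h1 h2
        have hi : i < m + 1 := by simpa using h2
        have hi' : i < s.length := by omega
        have hgi := hget i hi'
        rw [← pvGetD_eq _ i h1, hgi]
        rw [List.getElem_map, List.getElem_range]
        by_cases hc : t + 1 ≤ i ∧ i ≤ m
        · rw [if_pos hc]
          have hstep : pvNewA (e+1) (t+1) s i = pvStep (e+1) (t+1) (pvFA (e+1) t) i := by
            apply pvStep_eq_newA e (t+1) (by omega) _ _ i
            intro j hj
            rw [hs, pvMapGetD _ _ _ (by omega)]
          rw [hstep]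
          rfl
        · have hlt : i < t + 1 := by omega
          rw [if_neg hc, hs, pvMapGetD _ _ _ hi]
          show pvFA (e+1) t i = pvFA (e+1) (t+1) i
          rw [pvFA, pvStep_small e (t+1) _ i hlt]


theorem pvSumRange (f : ℕ → ℤ) (n : ℕ) :
    ((List.range n).map f).sum = ∑ i ∈ Finset.range n, f i := rfl

-- adding v at a list of distinct in-range positions
theorem pvFoldAdd (L : List ℤ) (v : ℤ) : ∀ (xs : List Int), L.Nodup →
    (∀ x ∈ L, 0 ≤ x ∧ x < (xs.length : ℤ)) →
    ((L.foldl (fun cs mm => cs.set mm.toNat (cs.getD mm.toNat 0 + v)) xs).length = xs.length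
    ∧ ∀ i < xs.length, (L.foldl (fun cs mm => cs.set mm.toNat (cs.getD mm.toNat 0 + v)) xs).getD i 0
        = xs.getD i 0 + (if (i : ℤ) ∈ L then v else 0)) := by
  induction L with
  | nil => intro xs _ _; exact ⟨rfl, fun i hi => by simp⟩
  | cons a L ih =>
      intro xs hnd hdom
      have ha := hdom a List.mem_cons_self
      have hat : a.toNat < xs.length := by omega
      set xs' := xs.set a.toNat (xs.getD a.toNat 0 + v) with hxs'
      have hlen' : xs'.length = xs.length := by simp [hxs']
      have hnd' : L.Nodup := (List.nodup_cons.mp hnd).2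
      have hna : a ∉ L := (List.nodup_cons.mp hnd).1
      have hdom' : ∀ x ∈ L, 0 ≤ x ∧ x < (xs'.length : ℤ) := by
        intro x hx; rw [hlen']; exact hdom x (List.mem_cons_of_mem a hx)
      obtain ⟨l1, l2⟩ := ih xs' hnd' hdom'
      simp only [List.foldl_cons]
      refine ⟨by rw [← hxs'] at *; rw [l1, hlen'], ?_⟩
      intro i hi
      have hi' : i < xs'.length := by omega
      rw [← hxs', l2 i hi']
      by_cases hia : (i : ℤ) = a
      · have hian : i = a.toNat := by omega
        have h1 : xs'.getD i 0 = xs.getD i 0 + v := by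
          rw [hxs', hian, pvGetD_eq _ _ (by simpa using hat), List.getElem_set_self, pvGetD_eq _ _ hat]
        rw [h1, if_neg (show (i:ℤ) ∉ L by rw [hia]; exact hna),
            if_pos (List.mem_cons.mpr (Or.inl hia))]
        ring
      · have h1 : xs'.getD i 0 = xs.getD i 0 := by
          rw [hxs']
          simp [List.getD_eq_getElem?_getD, List.getElem?_set_ne (show a.toNat ≠ i by omega)]
        rw [h1]
        by_cases hiL : (i : ℤ) ∈ L
        · rw [if_pos hiL, if_pos (List.mem_cons_of_mem a hiL)]
        · rw [if_neg hiL, if_neg (by simp [hia, hiL])]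

theorem pvSieveN (m nn : ℕ) (hn : 1 ≤ nn) (c : List Int) (hlen : c.length = m + 1) :
    ((PySem.List.pyRange (nn : ℤ) ((m : ℤ) + 1) (nn : ℤ)).foldl
        (fun cs mm => cs.set mm.toNat (cs.getD mm.toNat 0 + (nn : ℤ))) c).length = c.length
    ∧ ∀ i < c.length, ((PySem.List.pyRange (nn : ℤ) ((m : ℤ) + 1) (nn : ℤ)).foldl
        (fun cs mm => cs.set mm.toNat (cs.getD mm.toNat 0 + (nn : ℤ))) c).getD i 0
      = c.getD i 0 + (if nn ∣ i ∧ nn ≤ i then (nn : ℤ) else 0) := by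
  have hpos : (0 : ℤ) < (nn : ℤ) := by omega
  have hnd : (PySem.List.pyRange (nn : ℤ) ((m : ℤ) + 1) (nn : ℤ)).Nodup := by
    rw [PySem.List.pyRange_of_pos _ _ hpos]
    refine List.Nodup.map ?_ (List.nodup_range)
    intro x y hxy
    simp only at hxy
    have hx2 : (nn : ℤ) * x = (nn : ℤ) * y := by omega
    exact_mod_cast mul_left_cancel₀ (by omega : (nn:ℤ) ≠ 0) hx2
  have hdom : ∀ x ∈ PySem.List.pyRange (nn : ℤ) ((m : ℤ) + 1) (nn : ℤ), 0 ≤ x ∧ x < (c.length : ℤ) := by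
    intro x hx
    rw [PySem.List.mem_pyRange_iff_of_pos hpos] at hx
    constructor
    · omega
    · rw [hlen]; omega
  obtain ⟨l1, l2⟩ := pvFoldAdd _ _ c hnd hdom
  refine ⟨l1, fun i hi => ?_⟩
  rw [l2 i hi]
  congr 1
  have hmem : ((i : ℤ) ∈ PySem.List.pyRange (nn : ℤ) ((m : ℤ) + 1) (nn : ℤ)) ↔ (nn ∣ i ∧ nn ≤ i) := by
    rw [PySem.List.mem_pyRange_iff_of_pos hpos]
    constructor
    · rintro ⟨h1, h2, h3⟩
      have : (nn : ℤ) ∣ (i : ℤ) := by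
        obtain ⟨w, hw⟩ := h3
        exact ⟨w + 1, by rw [mul_add, mul_one, ← hw]; ring⟩
      exact ⟨by exact_mod_cast this, by omega⟩
    · rintro ⟨h1, h2⟩
      refine ⟨by omega, by rw [hlen] at hi; omega, ?_⟩
      have : (nn : ℤ) ∣ (i : ℤ) := by exact_mod_cast h1
      obtain ⟨w, hw⟩ := this
      exact ⟨w - 1, by rw [hw]; ring⟩
  by_cases hc : nn ∣ i ∧ nn ≤ i
  · rw [if_pos hc, if_pos (hmem.mpr hc)]
  · rw [if_neg hc, if_neg (fun h => hc (hmem.mp h))]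


theorem pvSigmaFold (m t : ℕ) (ht : t ≤ m) :
    ((PySem.List.pyRange 1 ((t : ℤ) + 1) 1).foldl
        (fun sg n => (PySem.List.pyRange n ((m : ℤ) + 1) n).foldl
          (fun cs mm => cs.set mm.toNat (cs.getD mm.toNat 0 + n)) sg)
        (List.replicate (m+1) (0:ℤ))).length = m + 1
    ∧ ∀ k < m + 1, ((PySem.List.pyRange 1 ((t : ℤ) + 1) 1).foldl
        (fun sg n => (PySem.List.pyRange n ((m : ℤ) + 1) n).foldl
          (fun cs mm => cs.set mm.toNat (cs.getD mm.toNat 0 + n)) sg)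
        (List.replicate (m+1) (0:ℤ))).getD k 0
      = ∑ n ∈ Finset.Icc 1 t, (if n ∣ k ∧ n ≤ k then (n : ℤ) else 0) := by
  induction t with
  | zero =>
      rw [PySem.List.pyRange_one_eq_nil (by omega), List.foldl_nil]
      refine ⟨by simp, fun k hk => ?_⟩
      simp
  | succ t ih =>
      obtain ⟨ihlen, ihget⟩ := ih (by omega)
      have hsplit : PySem.List.pyRange 1 (((t+1 : ℕ) : ℤ) + 1) 1
          = PySem.List.pyRange 1 ((t : ℤ) + 1) 1 ++ [(t : ℤ) + 1] := by
        rw [show ((t+1 : ℕ) : ℤ) + 1 = ((t : ℤ) + 1) + 1 by push_cast; ring,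
            PySem.List.pyRange_one_succ_right (by omega)]
      rw [hsplit, List.foldl_append, List.foldl_cons, List.foldl_nil]
      set sg := (PySem.List.pyRange 1 ((t : ℤ) + 1) 1).foldl
        (fun sg n => (PySem.List.pyRange n ((m : ℤ) + 1) n).foldl
          (fun cs mm => cs.set mm.toNat (cs.getD mm.toNat 0 + n)) sg)
        (List.replicate (m+1) (0:ℤ)) with hsg
      have hcast : ((t : ℤ) + 1) = ((t+1 : ℕ) : ℤ) := by push_cast; ring
      rw [hcast]
      obtain ⟨l1, l2⟩ := pvSieveN m (t+1) (by omega) sg ihlen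
      refine ⟨by rw [l1, ihlen], fun k hk => ?_⟩
      rw [l2 k (by omega), ihget k hk, Finset.sum_Icc_succ_top (by omega : 1 ≤ t + 1)]

theorem pvSigmaVal (m k : ℕ) (h1 : 1 ≤ k) (h2 : k ≤ m) :
    ∑ n ∈ Finset.Icc 1 m, (if n ∣ k ∧ n ≤ k then (n : ℤ) else 0) = pvSigma k := by
  rw [← Finset.sum_filter, pvSigma]
  apply Finset.sum_congr _ (fun _ _ => rfl)
  ext i
  simp only [Finset.mem_filter, Finset.mem_Icc, Nat.mem_divisors]
  constructor
  · rintro ⟨⟨hi1, _⟩, hd, _⟩; exact ⟨hd, by omega⟩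
  · rintro ⟨hd, _⟩
    have hi1 : 1 ≤ i := by
      rcases Nat.eq_zero_or_pos i with h0 | h; · subst h0; simp at hd; omega
      · omega
    have hik : i ≤ k := Nat.le_of_dvd (by omega) hd
    exact ⟨⟨hi1, by omega⟩, hd, hik⟩


-- g_t: the p-list contents after processing N = 1..t
def pvPg (dd t i : ℕ) : ℤ := if i ≤ t then pvP dd i else 0

theorem pvPinner (dd m t : ℕ) (ht : t + 1 ≤ m) (sigma : List Int)
    (hsig : ∀ k, 1 ≤ k → k ≤ m → sigma.getD k 0 = pvSigma k) :
    (PySem.List.pyRange 1 (((t+1 : ℕ) : ℤ) + 1) 1).foldl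
      (fun s k => s + sigma.getD k.toNat 0 *
        ((List.range (m+1)).map (pvPg dd t)).getD ((((t+1 : ℕ) : ℤ)) - k).toNat 0) 0
    = ∑ j ∈ Finset.range (t+1), pvSigma (j+1) * pvP dd (t - j) := by
  rw [PySem.List.foldl_add _ (fun k => sigma.getD k.toNat 0 *
        ((List.range (m+1)).map (pvPg dd t)).getD ((((t+1 : ℕ) : ℤ)) - k).toNat 0) 0,
      PySem.List.pyRange_one, List.map_map, zero_add]
  rw [show ((((t+1 : ℕ) : ℤ) + 1 - 1)).toNat = t + 1 by omega]
  rw [pvSumRange]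
  apply Finset.sum_congr rfl
  intro j hj
  rw [Finset.mem_range] at hj
  simp only [Function.comp]
  have e1 : ((1 : ℤ) + (j : ℕ)).toNat = 1 + j := by omega
  have e2 : ((((t+1 : ℕ) : ℤ)) - (1 + (j : ℕ))).toNat = t - j := by
    push_cast; omega
  rw [e1, e2, hsig (1+j) (by omega) (by omega), pvMapGetD _ _ _ (by omega : t - j < m + 1)]
  rw [pvPg, if_pos (by omega : t - j ≤ t)]
  rw [show 1 + j = j + 1 by omega]

theorem pvPouter (dd m : ℕ) (sigma : List Int)
    (hsig : ∀ k, 1 ≤ k → k ≤ m → sigma.getD k 0 = pvSigma k) :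
    ∀ t, t ≤ m →
    (PySem.List.pyRange 1 ((t : ℤ) + 1) 1).foldl
      (fun p N =>
        p.set N.toNat (PySem.Int.floordiv ((dd : ℤ) *
          (PySem.List.pyRange 1 (N + 1) 1).foldl
            (fun s k => s + sigma.getD k.toNat 0 * p.getD ((N - k)).toNat 0) 0) N))
      ((List.replicate (m+1) (0:ℤ)).set 0 1)
    = (List.range (m+1)).map (pvPg dd t) := by
  intro t
  induction t with
  | zero =>
      intro _
      rw [PySem.List.pyRange_one_eq_nil (by omega), List.foldl_nil, pvInit m]
      apply List.map_congr_left
      intro i hi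
      rw [List.mem_range] at hi
      rcases Nat.eq_zero_or_pos i with h0 | hp
      · subst h0; simp [pvDelta, pvPg, pvP]
      · rw [pvDelta, if_neg (by omega), pvPg, if_neg (by omega)]
  | succ t ih =>
      intro ht
      have hsplit : PySem.List.pyRange 1 (((t+1 : ℕ) : ℤ) + 1) 1
          = PySem.List.pyRange 1 ((t : ℤ) + 1) 1 ++ [(t : ℤ) + 1] := by
        rw [show ((t+1 : ℕ) : ℤ) + 1 = ((t : ℤ) + 1) + 1 by push_cast; ring,
            PySem.List.pyRange_one_succ_right (by omega)]
      rw [hsplit, List.foldl_append, ih (by omega), List.foldl_cons, List.foldl_nil]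
      rw [show ((t : ℤ) + 1) = ((t+1 : ℕ) : ℤ) by push_cast; ring]
      rw [pvPinner dd m t ht sigma hsig]
      rw [show (((t+1 : ℕ) : ℤ)).toNat = t + 1 by omega]
      have hpv : PySem.Int.floordiv ((dd : ℤ) * ∑ j ∈ Finset.range (t+1), pvSigma (j+1) * pvP dd (t - j)) ((t+1 : ℕ) : ℤ)
          = pvP dd (t+1) := by
        rw [pvP]
        congr 1
      rw [hpv]
      apply List.ext_getElem
      · simp
      · intro i h1 h2
        simp only [List.length_set, List.length_map, List.length_range] at h1
        rw [List.getElem_map, List.getElem_range]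
        by_cases hi : i = t + 1
        · subst hi
          rw [List.getElem_set_self (by simp; omega)]
          rw [pvPg, if_pos (le_refl _)]
        · rw [List.getElem_set_ne (by omega), List.getElem_map, List.getElem_range]
          rw [pvPg, pvPg]
          by_cases hle : i ≤ t
          · rw [if_pos hle, if_pos (by omega)]
          · rw [if_neg hle, if_neg (by omega)]


theorem pvA_eq (e m : ℕ) :
    bosonic_string_partition_coeffs ((e+1 : ℕ) : ℤ) ((m : ℕ) : ℤ)
      = (List.range (m+1)).map (pvFA (e+1) m) := by
  simp only [bosonic_string_partition_coeffs]
  rw [if_neg (by omega : ¬ ((e+1 : ℕ) : ℤ) = 0)]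
  rw [show (((m : ℕ) : ℤ) + 1).toNat = m + 1 by omega]
  exact pvAouter e m m (le_refl m)

theorem pvB_eq (e m : ℕ) :
    bosonic_string_partition_coeffs_alt ((e+1 : ℕ) : ℤ) ((m : ℕ) : ℤ)
      = (List.range (m+1)).map (pvP (e+1)) := by
  simp only [bosonic_string_partition_coeffs_alt]
  rw [if_neg (by omega : ¬ ((e+1 : ℕ) : ℤ) = 0)]
  rw [show (((m : ℕ) : ℤ) + 1).toNat = m + 1 by omega]
  obtain ⟨slen, sget⟩ := pvSigmaFold m m (le_refl m)
  have hsig : ∀ k, 1 ≤ k → k ≤ m →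
      ((PySem.List.pyRange 1 ((m : ℤ) + 1) 1).foldl
        (fun sg n => (PySem.List.pyRange n ((m : ℤ) + 1) n).foldl
          (fun cs mm => cs.set mm.toNat (cs.getD mm.toNat 0 + n)) sg)
        (List.replicate (m+1) (0:ℤ))).getD k 0 = pvSigma k := by
    intro k hk1 hk2
    rw [sget k (by omega), pvSigmaVal m k hk1 hk2]
  rw [pvPouter (e+1) m _ hsig m (le_refl m)]
  apply List.map_congr_left
  intro i hi
  rw [List.mem_range] at hi
  rw [pvPg, if_pos (by omega : i ≤ m)]

-- ===== VERDICT (by name: the statement is the Claim_ definition above) =====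
theorem bosonic_string_partition_coeffs_spec : Claim_equal_bosonic_string_partition_coeffs := by
  intro d max_N hdom hpre
  obtain ⟨hd, hm⟩ := hpre
  obtain ⟨dn, rfl⟩ : ∃ dn : ℕ, d = (dn : ℤ) := ⟨d.toNat, by omega⟩
  obtain ⟨m, rfl⟩ : ∃ m : ℕ, max_N = (m : ℤ) := ⟨max_N.toNat, by omega⟩
  unfold Spec_bosonic_string_partition_coeffs
  cases dn with
  | zero =>
      simp only [bosonic_string_partition_coeffs, bosonic_string_partition_coeffs_alt]
      rw [if_pos (by simp), if_pos (by simp)]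
      rw [show (((m : ℕ) : ℤ) + 1).toNat = m + 1 by omega,
          show (((m : ℕ) : ℤ)).toNat = m by omega]
      rw [List.replicate_succ]
      rfl
  | succ e =>
      rw [pvA_eq e m, pvB_eq e m]
      apply List.map_congr_left
      intro i hi
      rw [List.mem_range] at hi
      exact (pvMain e m i (by omega)).symm
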